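-- pv_equiv track=rewrite | github.com/1x1x-cloud/Emotional_Agent | backend/user_profile.py | get_emotion_summary
-- ===== SOURCE A (Python) =====
-- from typing import Dict, List, Optional
--
-- def get_emotion_summary(messages: List[Dict]) -> Dict:
--     """
--     获取情感总结
--     """
--     if not messages:
--         return {
--             "total": 0,
--             "positive": 0,
--             "negative": 0,
--             "neutral": 0
--         }
--
--     positive = sum(1 for msg in messages
--                  if msg.get("sentiment", {}).get("sentiment") == True)
--     negative = sum(1 for msg in messages
--                  if msg.get("sentiment", {}).get("sentiment") == False)
--     neutral = sum(1 for msg in messages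
--                 if msg.get("sentiment", {}).get("sentiment") is None)
--
--     return {
--         "total": len(messages),
--         "positive": positive,
--         "negative": negative,
--         "neutral": neutral
--     }
-- ===== SOURCE B (Python) =====
-- from typing import Dict, List, Optional
--
-- def get_emotion_summary(messages: List[Dict]) -> Dict:
--     sentiments = [msg.get("sentiment", {}).get("sentiment") for msg in messages]
--     freq = {}
--     for s in sentiments:
--         freq[s] = freq.get(s, 0) + 1
--     return {
--         "total": len(messages),
--         "positive": freq.get(True, 0),
--         "negative": freq.get(False, 0),
--         "neutral": freq.get(None, 0)
--     }
-- ===== Notes on version B (the rewrite author's own statement) =====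
-- stated objective: alternative
-- what changed: Replaces A's three per-category counting comprehensions (one boolean test per category per message) with a Counter-style frequency table built once over the raw sentiment values, from which the three counts are read off by dictionary lookup; the empty-list special case disappears since the histogram yields the same zeros.
import Mathlib
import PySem

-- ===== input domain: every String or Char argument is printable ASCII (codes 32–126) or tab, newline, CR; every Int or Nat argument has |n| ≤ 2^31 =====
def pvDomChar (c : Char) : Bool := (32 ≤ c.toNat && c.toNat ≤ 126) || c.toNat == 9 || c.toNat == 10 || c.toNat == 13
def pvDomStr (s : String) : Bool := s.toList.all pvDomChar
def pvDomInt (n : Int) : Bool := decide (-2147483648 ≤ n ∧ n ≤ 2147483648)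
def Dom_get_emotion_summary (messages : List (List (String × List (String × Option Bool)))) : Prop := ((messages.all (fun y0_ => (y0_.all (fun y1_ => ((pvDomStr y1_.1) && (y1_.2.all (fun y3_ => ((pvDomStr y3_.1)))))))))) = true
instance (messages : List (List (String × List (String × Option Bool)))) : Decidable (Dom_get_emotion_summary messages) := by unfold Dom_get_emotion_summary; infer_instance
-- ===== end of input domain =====

-- B replaces A's three per-category counting passes by one histogram (frequency table) of the raw sentiment values, read off by lookup; objective: alternative (same asymptotic cost).

-- ===== PORT A =====
-- msg.get("sentiment", {}).get("sentiment"), flattened to the Python value (none = Python None, whether the key is absent or stored as None)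
def pvSentA (msg : List (String × List (String × Option Bool))) : Option Bool :=
  match PySem.Dict.get? (PySem.Dict.mk (PySem.Dict.getD (PySem.Dict.mk msg) "sentiment" [])) "sentiment" with
  | none => none
  | some v => v

def get_emotion_summary (messages : List (List (String × List (String × Option Bool)))) : List (String × Int) :=
  if messages = [] then
    [("total", 0), ("positive", 0), ("negative", 0), ("neutral", 0)]
  else
    let positive := messages.foldl (fun acc msg => if pvSentA msg == some true then acc + 1 else acc) (0 : Int)
    let negative := messages.foldl (fun acc msg => if pvSentA msg == some false then acc + 1 else acc) (0 : Int)
    let neutral := messages.foldl (fun acc msg => if pvSentA msg == none then acc + 1 else acc) (0 : Int)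
    [("total", (messages.length : Int)), ("positive", positive), ("negative", negative), ("neutral", neutral)]

-- ===== PORT B =====
def pvSentB (msg : List (String × List (String × Option Bool))) : Option Bool :=
  match PySem.Dict.get? (PySem.Dict.mk (PySem.Dict.getD (PySem.Dict.mk msg) "sentiment" [])) "sentiment" with
  | none => none
  | some v => v

-- Source B: the sentiment list, its frequency table (freq[s] = freq.get(s,0)+1), then three lookups
def get_emotion_summary_alt (messages : List (List (String × List (String × Option Bool)))) : List (String × Int) :=
  let sentiments := messages.map pvSentB
  let freq : PySem.Dict (Option Bool) Int :=
    sentiments.foldl (fun d s => PySem.Dict.insert d s (PySem.Dict.getD d s 0 + 1)) (PySem.Dict.mk [])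
  [("total", (messages.length : Int)),
   ("positive", PySem.Dict.getD freq (some true) 0),
   ("negative", PySem.Dict.getD freq (some false) 0),
   ("neutral", PySem.Dict.getD freq none 0)]

-- ===== PRECONDITION & SPEC =====
def Spec_get_emotion_summary (messages : List (List (String × List (String × Option Bool)))) (out : List (String × Int)) : Prop := out = get_emotion_summary_alt messages
instance (messages : List (List (String × List (String × Option Bool)))) (out : List (String × Int)) : Decidable (Spec_get_emotion_summary messages out) := by unfold Spec_get_emotion_summary; infer_instance

-- ===== CLAIM (what is proved, stated in full; the proofs are below) =====
def Claim_equal_get_emotion_summary : Prop := ∀ (messages : List (List (String × List (String × Option Bool)))), Dom_get_emotion_summary messages → Spec_get_emotion_summary messages (get_emotion_summary messages)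

-- ===== LEMMAS AND PROOFS =====
lemma pvSent_eq : pvSentB = pvSentA := rfl

-- the histogram lookup at key k is the number of messages whose sentiment is k
lemma pvFreq_getD (messages : List (List (String × List (String × Option Bool)))) (k : Option Bool) :
    PySem.Dict.getD ((messages.map pvSentB).foldl
        (fun d s => PySem.Dict.insert d s (PySem.Dict.getD d s 0 + 1)) (PySem.Dict.mk [])) k 0
      = (messages.countP (fun m => pvSentA m == k) : Int) := by
  rw [PySem.Dict.getD_foldl_insert_add_one]
  simp [List.count, List.countP_map, pvSent_eq, PySem.Dict.getD, PySem.Dict.get?, Function.comp_def]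

theorem get_emotion_summary_spec : Claim_equal_get_emotion_summary := by
  intro messages _
  unfold Spec_get_emotion_summary
  by_cases h : messages = []
  · subst h; decide
  · unfold get_emotion_summary get_emotion_summary_alt
    rw [if_neg h]
    simp only [pvFreq_getD, PySem.List.foldl_count_if, zero_add]
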